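-- pv_equiv track=rewrite | github.com/The6P4C/adventofcode | 2016/day4/part1.py | checksum
-- ===== SOURCE A (Python) =====
-- def checksum(name):
-- 	counts = {}
-- 	for c in name:
-- 		if c in counts.keys():
-- 			counts[c] += 1
-- 		else:
-- 			counts[c] = 1
--
-- 	checksum = ''
-- 	for i in range(max(counts.values()), 0, -1):
-- 		chars = ''
-- 		for c, n in counts.items():
-- 			if n == i:
-- 				chars += c
-- 		checksum += ''.join(sorted(chars))
--
-- 	return checksum[0:5]
-- ===== SOURCE B (Python) =====
-- def checksum(name):
--     counts = {}
--     for c in name: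
--         counts[c] = counts.get(c, 0) + 1
--     pairs = sorted((-n, c) for c, n in counts.items())
--     return ''.join(c for _, c in pairs[:5])
-- ===== Notes on version B (the rewrite author's own statement) =====
-- stated objective: faster
-- what changed: Replaces A's bucket-by-count scan (iterate i from max count down to 1, rescanning the whole dict for chars with count i and sorting each bucket) by a single lexicographic sort of (-count, char) pairs, taking the first 5 chars.
import Mathlib
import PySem

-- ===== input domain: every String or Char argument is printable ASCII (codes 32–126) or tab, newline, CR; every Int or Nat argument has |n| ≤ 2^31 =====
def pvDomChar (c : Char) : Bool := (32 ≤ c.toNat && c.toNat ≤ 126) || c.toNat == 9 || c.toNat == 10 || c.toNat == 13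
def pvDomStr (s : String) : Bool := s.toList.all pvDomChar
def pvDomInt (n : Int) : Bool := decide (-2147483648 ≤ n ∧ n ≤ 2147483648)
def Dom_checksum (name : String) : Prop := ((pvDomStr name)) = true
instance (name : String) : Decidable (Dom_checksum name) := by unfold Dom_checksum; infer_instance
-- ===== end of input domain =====

-- ===== PORT A =====
-- B replaces A's bucket-by-count-value scan (range(max,0,-1) with an inner dict scan per value)
-- by one sort of (-count, char) pairs; objective: faster (no per-count-value rescan).
def checksum (name : String) : String :=
  let counts : PySem.Dict Char Int := name.toList.foldl
    (fun d c => if d.contains c then d.insert c (d.getD c 0 + 1) else d.insert c 1)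
    PySem.Dict.empty
  match PySem.List.max? counts.values (fun v => v) with
  | none => ""   -- max() of an empty sequence raises ValueError; excluded by Pre_checksum
  | some m =>
    let cs : List Char := (PySem.List.pyRange m 0 (-1)).foldl
      (fun acc i =>
        let chars : List Char := counts.items.foldl
          (fun ch p => if p.2 == i then ch ++ [p.1] else ch) []
        acc ++ PySem.List.sorted chars (fun x => x) false)
      []
    String.ofList (PySem.List.slice cs (some 0) (some 5))

-- ===== PORT B =====
def checksum_alt (name : String) : String :=
  let counts : PySem.Dict Char Int := name.toList.foldl
    (fun d c => d.insert c (d.getD c 0 + 1)) PySem.Dict.empty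
  let pairs : List (Int × Char) :=
    PySem.List.sorted2 (counts.items.map (fun p => (-p.2, p.1))) Prod.fst Prod.snd false
  String.ofList ((PySem.List.slice pairs none (some 5)).map (fun q => q.2))

-- ===== PRECONDITION & SPEC =====
-- Pre_ excludes only the empty string, on which A's max(counts.values()) raises ValueError.
def Pre_checksum (name : String) : Prop := name ≠ ""
instance (name : String) : Decidable (Pre_checksum name) := by unfold Pre_checksum; infer_instance
def pvWitness_checksum : String := "aabbc"

def Spec_checksum (name : String) (out : String) : Prop := out = checksum_alt name
instance (name : String) (out : String) : Decidable (Spec_checksum name out) := by unfold Spec_checksum; infer_instance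

-- ===== CLAIM (what is proved, stated in full; the proofs are below) =====
def Claim_equal_checksum : Prop := ∀ (name : String), Dom_checksum name → Pre_checksum name → Spec_checksum name (checksum name)

-- ===== LEMMAS AND PROOFS =====

-- strict lexicographic order on the (negated count, char) pairs B sorts
def pvLt (a b : Int × Char) : Prop := a.1 < b.1 ∨ (a.1 = b.1 ∧ a.2 < b.2)

-- sorted2's comparator for keys fst, snd (definitionally the one in PySem.List.sorted2)
def pvLtB (a b : Int × Char) : Bool :=
  decide (a.1 < b.1) || (!decide (b.1 < a.1) && decide (a.2 < b.2))

lemma pvLtB_iff (a b : Int × Char) : pvLtB a b = true ↔ pvLt a b := by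
  unfold pvLtB pvLt
  rcases lt_trichotomy a.1 b.1 with h | h | h
  · simp [h, lt_asymm h]
  · simp [h]
  · simp [h, lt_asymm h, h.ne']

lemma pvLt_asymm {a b : Int × Char} (h : pvLt a b) : ¬ pvLt b a := by
  rcases h with h | ⟨h1, h2⟩ <;> rintro (g | ⟨g1, g2⟩)
  · omega
  · omega
  · omega
  · exact lt_asymm h2 g2

lemma pvLt_trans {a b c : Int × Char} (h : pvLt a b) (h' : pvLt b c) : pvLt a c := by
  rcases h with h | ⟨h1, h2⟩ <;> rcases h' with g | ⟨g1, g2⟩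
  · exact Or.inl (lt_trans h g)
  · exact Or.inl (g1 ▸ h)
  · exact Or.inl (h1 ▸ g)
  · exact Or.inr ⟨h1.trans g1, lt_trans h2 g2⟩

lemma pvLt_total {a b : Int × Char} (h1 : ¬ pvLt a b) (h2 : ¬ pvLt b a) : a = b := by
  unfold pvLt at h1 h2
  push_neg at h1 h2
  have e1 : a.1 = b.1 := le_antisymm h2.1 h1.1
  have e2 : a.2 = b.2 := le_antisymm (h2.2 e1.symm) (h1.2 e1)
  exact Prod.ext e1 e2

-- the insertion step of sorted2 preserves ¬pvLt-sortedness
lemma pvInsertBy_pairwise (x : Int × Char) (l : List (Int × Char))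
    (h : l.Pairwise (fun a b => ¬ pvLt b a)) :
    (PySem.List.insertBy pvLtB x l).Pairwise (fun a b => ¬ pvLt b a) := by
  induction l with
  | nil => simp [PySem.List.insertBy]
  | cons y ys ih =>
    rcases List.pairwise_cons.1 h with ⟨hy, hys⟩
    by_cases hxy : pvLt x y
    · have hb : pvLtB x y = true := (pvLtB_iff x y).2 hxy
      rw [show PySem.List.insertBy pvLtB x (y :: ys) = x :: y :: ys by
        simp [PySem.List.insertBy, hb]]
      refine List.pairwise_cons.2 ⟨?_, h⟩
      intro z hz
      rcases List.mem_cons.1 hz with rfl | hz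
      · exact pvLt_asymm hxy
      · exact fun hzx => (hy z hz) (pvLt_trans hzx hxy)
    · have hb : pvLtB x y = false := by
        rcases Bool.eq_false_or_eq_true (pvLtB x y) with ht | hf
        · exact absurd ((pvLtB_iff x y).1 ht) hxy
        · exact hf
      rw [show PySem.List.insertBy pvLtB x (y :: ys)
            = y :: PySem.List.insertBy pvLtB x ys by
        simp [PySem.List.insertBy, hb]]
      refine List.pairwise_cons.2 ⟨?_, ih hys⟩
      intro z hz
      rcases (PySem.List.mem_insertBy pvLtB x z ys).1 hz with rfl | hz
      · exact hxy
      · exact hy z hz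

lemma pvSorted2_pairwise (xs : List (Int × Char)) :
    (PySem.List.sorted2 xs Prod.fst Prod.snd false).Pairwise (fun a b => ¬ pvLt b a) := by
  show (xs.foldl (fun acc x => PySem.List.insertBy pvLtB x acc) []).Pairwise
      (fun a b => ¬ pvLt b a)
  have key : ∀ (ts acc : List (Int × Char)),
      acc.Pairwise (fun a b => ¬ pvLt b a) →
      (ts.foldl (fun acc x => PySem.List.insertBy pvLtB x acc) acc).Pairwise
        (fun a b => ¬ pvLt b a) := by
    intro ts
    induction ts with
    | nil => intro acc h; exact h
    | cons t ts ih => intro acc h; exact ih _ (pvInsertBy_pairwise t acc h)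
  exact key xs [] List.Pairwise.nil

-- the output of sorted2 with keys fst, snd is THE strictly-lex-sorted rearrangement
lemma pvSorted2_eq (xs ys : List (Int × Char)) (hp : ys.Perm xs)
    (hs : ys.Pairwise pvLt) :
    PySem.List.sorted2 xs Prod.fst Prod.snd false = ys := by
  have hperm : (PySem.List.sorted2 xs Prod.fst Prod.snd false).Perm ys :=
    (PySem.List.sorted2_perm xs Prod.fst Prod.snd false).trans hp.symm
  exact List.Perm.eq_of_pairwise
    (fun a b _ _ h h' => pvLt_total h' h)
    (pvSorted2_pairwise xs) (hs.imp fun h => pvLt_asymm h) hperm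

-- partition permutation: concatenating the key-buckets over a duplicate-free index list
lemma pvPartition_perm {α : Type} (key : α → Int) :
    ∀ (I : List Int) (S : List α), I.Nodup → (∀ x ∈ S, key x ∈ I) →
      (I.flatMap (fun i => S.filter (fun x => key x == i))).Perm S := by
  intro I
  induction I with
  | nil =>
    intro S _ hkey
    have : S = [] := List.eq_nil_iff_forall_not_mem.2 fun x hx => by simpa using hkey x hx
    simp [this]
  | cons i I ih =>
    intro S hnd hkey
    rcases List.nodup_cons.1 hnd with ⟨hni, hnd'⟩
    rw [List.flatMap_cons]
    have hstep : I.flatMap (fun j => S.filter (fun x => key x == j))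
        = I.flatMap (fun j => (S.filter (fun x => !(key x == i))).filter (fun x => key x == j)) := by
      apply List.flatMap_congr
      intro j hj
      rw [List.filter_filter]
      apply List.filter_congr
      intro x _
      by_cases hx : key x = j
      · have hji : ¬ j = i := fun e => hni (e ▸ hj)
        simp [hx, hji]
      · simp [hx]
    have hSub : ∀ x ∈ S.filter (fun x => !(key x == i)), key x ∈ I := by
      intro x hx
      rcases List.mem_filter.1 hx with ⟨hxS, hxi⟩
      rcases List.mem_cons.1 (hkey x hxS) with h | h
      · exact absurd h (by simpa using hxi)
      · exact h
    rw [hstep]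
    exact (List.Perm.append_left _ (ih _ hnd' hSub)).trans (List.filter_append_perm _ S)

lemma pvFlatMap_perm {α β : Type} (I : List α) (g h : α → List β)
    (hg : ∀ i ∈ I, (g i).Perm (h i)) : (I.flatMap g).Perm (I.flatMap h) := by
  induction I with
  | nil => simp
  | cons i I ih =>
    simp only [List.flatMap_cons]
    exact (hg i (by simp)).append (ih fun j hj => hg j (by simp [hj]))

lemma pvRange_neg_one_gt (m : Int) : (PySem.List.pyRange m 0 (-1)).Pairwise (· > ·) := by
  rw [PySem.List.pyRange_neg_one]
  exact List.pairwise_map.2 ((List.pairwise_lt_range).imp (by intro a b h; omega))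

-- core: B's single lex sort of (-count, char) pairs equals A's descending count buckets
lemma pvMain (S : List Char) (f : Char → Int) (m : Int) (hS : S.Nodup)
    (h1 : ∀ c ∈ S, 0 < f c) (h2 : ∀ c ∈ S, f c ≤ m) :
    PySem.List.sorted2 (S.map (fun c => (-f c, c))) Prod.fst Prod.snd false
      = (PySem.List.pyRange m 0 (-1)).flatMap
          (fun i => (PySem.List.sorted (S.filter (fun c => f c == i)) (fun x => x) false).map
            (fun c => (-i, c))) := by
  apply pvSorted2_eq
  · -- permutation
    have hInd : (PySem.List.pyRange m 0 (-1)).Nodup :=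
      (pvRange_neg_one_gt m).imp (fun h => ne_of_gt h)
    have hbucket : ∀ i ∈ PySem.List.pyRange m 0 (-1),
        ((PySem.List.sorted (S.filter (fun c => f c == i)) (fun x => x) false).map
          (fun c => (-i, c))).Perm
        ((S.filter (fun c => f c == i)).map (fun c => (-f c, c))) := by
      intro i _
      have hmap : (PySem.List.sorted (S.filter (fun c => f c == i)) (fun x => x) false).map
            (fun c => (-i, c))
          = (PySem.List.sorted (S.filter (fun c => f c == i)) (fun x => x) false).map
            (fun c => (-f c, c)) := by
        apply List.map_congr_left
        intro c hc
        have hcf : f c = i := by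
          simpa using (List.mem_filter.1
            ((PySem.List.mem_sorted _ _ _ c).1 hc)).2
        simp [hcf]
      rw [hmap]
      exact (PySem.List.sorted_perm (S.filter (fun c => f c == i)) (fun x => x) false).map _
    refine (pvFlatMap_perm _ _ _ hbucket).trans ?_
    rw [show ((PySem.List.pyRange m 0 (-1)).flatMap
          (fun i => (S.filter (fun c => f c == i)).map (fun c => (-f c, c))))
        = ((PySem.List.pyRange m 0 (-1)).flatMap
          (fun i => S.filter (fun c => f c == i))).map (fun c => (-f c, c)) from
        (List.map_flatMap).symm]
    exact (pvPartition_perm f _ S hInd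
      (fun c hc => PySem.List.mem_pyRange_neg_one.2 ⟨h1 c hc, h2 c hc⟩)).map _
  · -- strict lexicographic sortedness
    rw [List.flatMap_def]
    refine List.pairwise_flatten.2 ⟨?_, ?_⟩
    · intro bl hbl
      rcases List.mem_map.1 hbl with ⟨i, _, rfl⟩
      refine List.pairwise_map.2 ?_
      have hnd : (PySem.List.sorted (S.filter (fun c => f c == i)) (fun x => x) false).Nodup :=
        ((PySem.List.sorted_perm (S.filter (fun c => f c == i)) (fun x => x) false).symm.nodup (hS.filter _))
      have hle := PySem.List.sorted_pairwise (S.filter (fun c => f c == i)) (fun x => x)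
      exact (hle.and hnd).imp (fun h => Or.inr ⟨rfl, lt_of_le_of_ne h.1 h.2⟩)
    · refine List.pairwise_map.2 ((pvRange_neg_one_gt m).imp ?_)
      intro a b h x hx y hy
      rcases List.mem_map.1 hx with ⟨c, _, rfl⟩
      rcases List.mem_map.1 hy with ⟨c', _, rfl⟩
      exact Or.inl (by simpa using h)

-- ===== VERDICT (by name: the statement is the Claim_ definition above) =====
theorem checksum_spec : Claim_equal_checksum := by
  intro name _ hpre
  unfold Spec_checksum checksum checksum_alt
  have hl : name.toList ≠ [] := fun h => hpre (String.toList_eq_nil_iff.1 h)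
  have hfun : (fun (d : PySem.Dict Char Int) c =>
        if d.contains c then d.insert c (d.getD c 0 + 1) else d.insert c 1)
      = fun (d : PySem.Dict Char Int) c => d.insert c (d.getD c 0 + 1) := by
    funext d c
    by_cases h : d.contains c = true
    · simp [h]
    · have hc : d.contains c = false := by simpa using h
      simp [h, PySem.Dict.getD_of_not_contains d 0 hc]
  rw [hfun, PySem.Dict.foldl_insert_getD_add_one_eq_counter]
  simp only [PySem.Dict.values, PySem.Dict.items_counter, List.map_map]
  simp only [Function.comp_def, PySem.List.foldl_append_if, List.nil_append,
    List.filter_map, List.map_map, PySem.List.foldl_append_eq_flatMap]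
  cases hmax : PySem.List.max?
      (List.map (fun k => ((List.count k name.toList : Int))) (PySem.Set.ofList name.toList))
      (fun v => v) with
  | none =>
    exfalso
    have h0 := (PySem.List.max?_eq_none_iff _ _).1 hmax
    rw [List.map_eq_nil_iff] at h0
    rcases List.exists_mem_of_ne_nil _ hl with ⟨c, hc⟩
    exact absurd ((PySem.Set.mem_ofList _ c).2 hc) (by simp [h0])
  | some m =>
    have hS := PySem.Set.nodup_ofList name.toList
    have h1 : ∀ c ∈ PySem.Set.ofList name.toList, (0:Int) < (List.count c name.toList : Int) := by
      intro c hc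
      have hcl : c ∈ name.toList := (PySem.Set.mem_ofList _ c).1 hc
      exact_mod_cast List.count_pos_iff.2 hcl
    have h2 : ∀ c ∈ PySem.Set.ofList name.toList, (List.count c name.toList : Int) ≤ m := by
      intro c hc
      exact PySem.List.max?_isMax hmax _ (List.mem_map_of_mem hc)
    rw [pvMain (PySem.Set.ofList name.toList) (fun c => (List.count c name.toList : Int)) m hS h1 h2]
    simp only [PySem.List.slice_zero_start, PySem.List.slice_to _ (by norm_num : (0:Int) ≤ (5:Int)),
      List.map_take, List.map_flatMap, List.map_map, Function.comp_def]
    simp
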